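-- pv_equiv track=rewrite | github.com/andreasblomqvist/simple_simulation | backend/src/services/simulation/utils.py | determine_level_order
-- ===== SOURCE A (Python) =====
-- def determine_level_order(config_data: list) -> list:
--     """Dynamically determine the level order from configuration."""
--     levels = set()
--     for office_config in config_data:
--         for role_name, role_data in office_config.get('roles', {}).items():
--             if role_name != 'Operations':
--                 levels.update(role_data.keys())
--
--     # Use a standard, sorted progression path
--     standard_order = ['A', 'AC', 'C', 'SrC', 'AM', 'M', 'SrM', 'PiP']
--
--     # Filter and sort found levels according to the standard order
--     sorted_levels = [level for level in standard_order if level in levels]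
--
--     return sorted_levels
-- ===== SOURCE B (Python) =====
-- def determine_level_order(config_data: list) -> list:
--     """Dynamically determine the level order from configuration."""
--     levels = {level
--               for office_config in config_data
--               for role_name, role_data in office_config.get('roles', {}).items()
--               if role_name != 'Operations'
--               for level in role_data}
--
--     standard_order = ['A', 'AC', 'C', 'SrC', 'AM', 'M', 'SrM', 'PiP']
--     index = {name: i for i, name in enumerate(standard_order)}
--     return sorted((level for level in levels if level in index),
--                   key=index.__getitem__)
-- ===== Notes on version B (the rewrite author's own statement) =====
-- stated objective: alternative
-- what changed: B gathers the levels in one set comprehension over the flattened config instead of nested loops with set.update, and replaces A's membership filter of the fixed standard_order list by an index dict plus a sort of the found levels by their index.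
import Mathlib
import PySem

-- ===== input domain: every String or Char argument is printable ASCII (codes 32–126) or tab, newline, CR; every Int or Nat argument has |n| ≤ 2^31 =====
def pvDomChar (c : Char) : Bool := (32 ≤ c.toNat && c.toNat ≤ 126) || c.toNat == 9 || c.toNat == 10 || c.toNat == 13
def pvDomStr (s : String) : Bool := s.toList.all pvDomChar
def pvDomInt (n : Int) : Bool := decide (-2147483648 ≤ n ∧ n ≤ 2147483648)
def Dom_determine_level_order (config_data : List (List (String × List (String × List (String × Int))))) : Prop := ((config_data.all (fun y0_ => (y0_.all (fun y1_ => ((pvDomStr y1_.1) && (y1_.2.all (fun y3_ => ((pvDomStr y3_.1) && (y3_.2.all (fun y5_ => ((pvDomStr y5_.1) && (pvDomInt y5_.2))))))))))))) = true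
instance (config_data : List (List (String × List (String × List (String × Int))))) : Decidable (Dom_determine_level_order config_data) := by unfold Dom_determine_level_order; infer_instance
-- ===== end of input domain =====

-- B replaces A's membership filter of the fixed standard_order list by an index dict plus a sort
-- of the found levels by index (objective: alternative decomposition; same collection loop).

-- ===== PORT A =====
-- A's nested collection loops over config_data
def pvLevels (config_data : List (List (String × List (String × List (String × Int))))) : PySem.Set String :=
  config_data.foldl (fun levels office_config =>
    ((PySem.Dict.ofList ((PySem.Dict.ofList office_config).getD "roles" [])).items).foldl
      (fun levels rd =>
        if rd.1 ≠ "Operations"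
        then PySem.Set.update levels (PySem.Dict.keys (PySem.Dict.ofList rd.2))  -- role_data.keys()
        else levels) levels) PySem.Set.empty

def determine_level_order (config_data : List (List (String × List (String × List (String × Int))))) : List String :=
  let levels := pvLevels config_data
  let standard_order : List String := ["A", "AC", "C", "SrC", "AM", "M", "SrM", "PiP"]
  standard_order.filter (fun level => PySem.Set.contains levels level)

-- ===== PORT B =====
def determine_level_order_alt (config_data : List (List (String × List (String × List (String × Int))))) : List String :=
  -- set comprehension: one flattened stream of level names, deduplicated in first-occurrence order
  let levels : PySem.Set String := PySem.Set.ofList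
    (config_data.flatMap (fun office_config =>
      ((PySem.Dict.ofList ((PySem.Dict.ofList office_config).getD "roles" [])).items).flatMap
        (fun rd =>
          if rd.1 ≠ "Operations"
          then PySem.Dict.keys (PySem.Dict.ofList rd.2)  -- for level in role_data
          else [])))
  let standard_order : List String := ["A", "AC", "C", "SrC", "AM", "M", "SrM", "PiP"]
  let index : PySem.Dict String Int :=
    (PySem.List.enumerate standard_order).foldl (fun d p => d.insert p.2 p.1) PySem.Dict.empty
  -- key=index.__getitem__: every element kept by the filter is a key of index, so getD's default is never read
  PySem.List.sorted (levels.filter (fun level => index.contains level))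
    (fun level => index.getD level 0)

-- ===== PRECONDITION & SPEC =====
def Spec_determine_level_order (config_data : List (List (String × List (String × List (String × Int))))) (out : List String) : Prop := out = determine_level_order_alt config_data
instance (config_data : List (List (String × List (String × List (String × Int))))) (out : List String) : Decidable (Spec_determine_level_order config_data out) := by unfold Spec_determine_level_order; infer_instance

-- ===== CLAIM (what is proved, stated in full; the proofs are below) =====
def Claim_equal_determine_level_order : Prop := ∀ (config_data : List (List (String × List (String × List (String × Int))))), Dom_determine_level_order config_data → Spec_determine_level_order config_data (determine_level_order config_data)

-- ===== LEMMAS AND PROOFS =====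

lemma pvLevels_nodup_inner (l : List (String × List (String × Int))) (s : PySem.Set String)
    (hs : s.Nodup) :
    (l.foldl (fun levels rd =>
      if rd.1 ≠ "Operations"
      then PySem.Set.update levels (PySem.Dict.keys (PySem.Dict.ofList rd.2))
      else levels) s).Nodup := by
  induction l generalizing s with
  | nil => exact hs
  | cons rd t ih =>
      simp only [List.foldl_cons]
      split
      · exact ih _ (PySem.Set.nodup_update _ _ hs)
      · exact ih _ hs

lemma pvLevels_nodup (config_data : List (List (String × List (String × List (String × Int))))) :
    (pvLevels config_data).Nodup := by
  unfold pvLevels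
  generalize hE : (PySem.Set.empty : PySem.Set String) = s
  have hs : s.Nodup := by rw [← hE]; exact List.nodup_nil
  clear hE
  induction config_data generalizing s with
  | nil => exact hs
  | cons oc t ih =>
      simp only [List.foldl_cons]
      exact ih _ (pvLevels_nodup_inner _ _ hs)


-- A's nested update-loops build the same set as B's flattened one-pass comprehension
lemma pvLevels_inner_flatten (l : List (String × List (String × Int))) (s : PySem.Set String) :
    (l.foldl (fun levels rd =>
      if rd.1 ≠ "Operations"
      then PySem.Set.update levels (PySem.Dict.keys (PySem.Dict.ofList rd.2))
      else levels) s)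
    = PySem.Set.update s (l.flatMap (fun rd =>
        if rd.1 ≠ "Operations" then PySem.Dict.keys (PySem.Dict.ofList rd.2) else [])) := by
  induction l generalizing s with
  | nil => rfl
  | cons rd t ih =>
      simp only [List.foldl_cons, List.flatMap_cons]
      split
      · rw [ih]; simp [PySem.Set.update, List.foldl_append]
      · rw [ih]; simp [PySem.Set.update]

lemma pvLevels_flatten (config_data : List (List (String × List (String × List (String × Int))))) :
    pvLevels config_data
    = PySem.Set.ofList (config_data.flatMap (fun office_config =>
        ((PySem.Dict.ofList ((PySem.Dict.ofList office_config).getD "roles" [])).items).flatMap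
          (fun rd =>
            if rd.1 ≠ "Operations"
            then PySem.Dict.keys (PySem.Dict.ofList rd.2)
            else []))) := by
  unfold pvLevels
  rw [show (PySem.Set.ofList = fun l => PySem.Set.update (PySem.Set.empty : PySem.Set String) l) from rfl]
  generalize (PySem.Set.empty : PySem.Set String) = s
  induction config_data generalizing s with
  | nil => rfl
  | cons oc t ih =>
      simp only [List.foldl_cons, List.flatMap_cons]
      rw [pvLevels_inner_flatten, ih]
      simp [PySem.Set.update, List.foldl_append]

-- the index dict B builds, as a closed term
def pvIndex : PySem.Dict String Int :=
  (PySem.List.enumerate (["A", "AC", "C", "SrC", "AM", "M", "SrM", "PiP"] : List String)).foldl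
    (fun d p => d.insert p.2 p.1) PySem.Dict.empty

lemma pvMain (S : PySem.Set String) (hS : S.Nodup) :
    (["A", "AC", "C", "SrC", "AM", "M", "SrM", "PiP"] : List String).filter
        (fun level => PySem.Set.contains S level)
      = PySem.List.sorted (S.filter (fun level => pvIndex.contains level))
          (fun level => pvIndex.getD level 0) := by
  have hkeys : pvIndex.keys = (["A", "AC", "C", "SrC", "AM", "M", "SrM", "PiP"] : List String) := by
    decide
  have hperm :
      ((["A", "AC", "C", "SrC", "AM", "M", "SrM", "PiP"] : List String).filter
        (fun level => PySem.Set.contains S level)).Perm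
        (S.filter (fun level => pvIndex.contains level)) := by
    rw [List.perm_ext_iff_of_nodup
      (List.Nodup.filter _ (by decide)) (List.Nodup.filter _ hS)]
    intro a
    simp only [List.mem_filter, PySem.Set.contains_iff,
      PySem.Dict.contains_eq_decide_mem_keys, hkeys, decide_eq_true_eq]
    tauto
  have hpair :
      ((["A", "AC", "C", "SrC", "AM", "M", "SrM", "PiP"] : List String).filter
        (fun level => PySem.Set.contains S level)).Pairwise
        (fun a b => pvIndex.getD a 0 < pvIndex.getD b 0) := by
    exact List.Pairwise.filter _ (by decide)
  exact (PySem.List.sorted_eq_of_perm_of_pairwise_lt _ _ _ hperm hpair).symm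

-- ===== VERDICT (by name: the statement is the Claim_ definition above) =====
theorem determine_level_order_spec : Claim_equal_determine_level_order := by
  intro config_data _
  unfold Spec_determine_level_order determine_level_order determine_level_order_alt
  rw [← pvLevels_flatten]
  exact pvMain (pvLevels config_data) (pvLevels_nodup config_data)
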